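-- pv_equiv track=rewrite | github.com/sun10081/leetcode_practice_xiaorui | questions/week/2023/2023_11/11_26/1.py | areSimilar
-- ===== SOURCE A (Python) =====
-- from typing import List
--
-- def areSimilar(mat: List[List[int]], k: int) -> bool:
--     m, n = len(mat), len(mat[0])
--     k %= n
--     new_arr = [[0] * n for _ in range(m)]
--     for i in range(m):
--         flag = i % 2 == 0
--         for j in range(n):
--             if flag:
--                 new_arr[i][j] = mat[i][j - k]
--             else:
--                 t = (j + k) % n
--                 new_arr[i][j] = mat[i][t]
--     return new_arr == mat
-- ===== SOURCE B (Python) =====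
-- from typing import List
--
-- def areSimilar(mat: List[List[int]], k: int) -> bool:
--     n = len(mat[0])
--     k %= n
--     for i, row in enumerate(mat):
--         rotated = row[-k:] + row[:-k] if i % 2 == 0 else row[k:] + row[:k]
--         if rotated != row:
--             return False
--     return True
-- ===== Notes on version B (the rewrite author's own statement) =====
-- stated objective: faster
-- what changed: Replaces A's allocate-a-whole-shifted-matrix and per-element (j+k)%n / j-k index arithmetic in a nested Python loop by whole-row slice-concatenation rotations compared row by row with early exit.
-- outside the precondition, e.g. on areSimilar([[1], [2, 2]], 0): A returns False, B returns True
import Mathlib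
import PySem

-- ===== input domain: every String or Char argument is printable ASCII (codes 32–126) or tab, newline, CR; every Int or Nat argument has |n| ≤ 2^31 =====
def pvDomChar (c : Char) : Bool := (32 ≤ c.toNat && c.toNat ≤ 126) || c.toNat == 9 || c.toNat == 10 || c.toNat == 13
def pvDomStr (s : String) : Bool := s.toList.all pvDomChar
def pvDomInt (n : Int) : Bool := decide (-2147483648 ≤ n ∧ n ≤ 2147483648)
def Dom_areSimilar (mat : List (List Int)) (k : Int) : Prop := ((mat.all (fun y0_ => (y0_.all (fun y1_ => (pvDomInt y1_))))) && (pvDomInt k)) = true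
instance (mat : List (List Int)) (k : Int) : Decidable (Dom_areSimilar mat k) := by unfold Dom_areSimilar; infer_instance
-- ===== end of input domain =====

-- B replaces A's allocate-and-fill of a shifted matrix (per-element (j+k)%n / j-k index arithmetic)
-- by per-row slice-concatenation rotations compared row by row (measured constant-factor speedup).


-- ===== PORT A =====
def areSimilar (mat : List (List Int)) (k : Int) : Bool :=
  let m := mat.length
  match PySem.List.pyGet? mat 0 with
  | none => false
  | some row0 =>
    let n := row0.length
    match PySem.Int.mod? k (n : Int) with
    | none => false
    | some kk =>
      let newArr := (PySem.List.pyRange 0 (m : Int) 1).map (fun i =>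
        let flag : Bool := PySem.Int.mod i 2 == 0
        (PySem.List.pyRange 0 (n : Int) 1).map (fun j =>
          if flag then
            PySem.List.pyGetD (PySem.List.pyGetD mat i []) (j - kk) 0
          else
            let t := PySem.Int.mod (j + kk) (n : Int)
            PySem.List.pyGetD (PySem.List.pyGetD mat i []) t 0))
      newArr == mat

-- ===== PORT B =====
def areSimilar_alt (mat : List (List Int)) (k : Int) : Bool :=
  match PySem.List.pyGet? mat 0 with
  | none => false
  | some row0 =>
    let n := row0.length
    match PySem.Int.mod? k (n : Int) with
    | none => false
    | some kk =>
      (PySem.List.enumerate mat 0).all (fun p =>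
        let rotated :=
          if PySem.Int.mod p.1 2 == 0 then
            PySem.List.slice p.2 (some (-kk)) none ++ PySem.List.slice p.2 none (some (-kk))
          else
            PySem.List.slice p.2 (some kk) none ++ PySem.List.slice p.2 none (some kk)
        rotated == p.2)

-- ===== PRECONDITION & SPEC =====
-- Pre_ excludes the empty matrix and an empty first row (A raises IndexError resp. ZeroDivisionError
-- there) and ragged inputs (rows of unequal length), on which A's indexing either raises or compares
-- against an accidentally truncated copy: such inputs are not matrices.
def Pre_areSimilar (mat : List (List Int)) (k : Int) : Prop :=
  mat ≠ [] ∧ 0 < mat.headI.length ∧ ∀ row ∈ mat, row.length = mat.headI.length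
instance (mat : List (List Int)) (k : Int) : Decidable (Pre_areSimilar mat k) := by
  unfold Pre_areSimilar; infer_instance
def pvWitness_areSimilar : List (List Int) × Int := ([[1, 2], [5, 4]], 1)

def Spec_areSimilar (mat : List (List Int)) (k : Int) (out : Bool) : Prop := out = areSimilar_alt mat k
instance (mat : List (List Int)) (k : Int) (out : Bool) : Decidable (Spec_areSimilar mat k out) := by unfold Spec_areSimilar; infer_instance

-- ===== CLAIM (what is proved, stated in full; the proofs are below) =====
def Claim_equal_areSimilar : Prop := ∀ (mat : List (List Int)) (k : Int), Dom_areSimilar mat k → Pre_areSimilar mat k → Spec_areSimilar mat k (areSimilar mat k)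

-- ===== LEMMAS AND PROOFS =====

-- A's even-row inner loop (right rotation via j-k, negative indices wrapping) equals B's slice concatenation.
theorem row_even (row : List Int) (c : Nat) (hc : c < row.length) :
    (PySem.List.pyRange 0 (row.length : Int) 1).map
        (fun j => PySem.List.pyGetD row (j - (c : Int)) 0)
      = PySem.List.slice row (some (-(c : Int))) none ++
        PySem.List.slice row none (some (-(c : Int))) := by
  rcases Nat.eq_zero_or_pos c with hc0 | hcpos
  · subst hc0
    simp only [Nat.cast_zero, neg_zero, PySem.List.slice_zero_start, PySem.List.slice_none_none,
      PySem.List.slice_to row (le_refl (0:Int))]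
    simp only [sub_zero, Int.toNat_zero, List.take_zero, List.append_nil]
    have := PySem.List.map_pyGetD_pyRange_zero row (0 : Int)
    simpa [PySem.List.len] using this
  · rw [PySem.List.slice_from_neg_natCast row c hcpos, PySem.List.slice_to_neg_natCast row c hcpos,
      PySem.List.pyRange_zero_natCast, List.map_map]
    apply List.ext_getElem
    · simp
    · intro i hi hi'
      simp only [List.length_map, List.length_range] at hi
      rw [List.getElem_map, List.getElem_range]
      by_cases hci : c ≤ i
      · have h1 : (0:Int) ≤ (i:Int) - (c:Int) := by omega
        have h2 : (i:Int) - (c:Int) < (row.length : Int) := by omega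
        rw [Function.comp_apply, PySem.List.pyGetD_eq_getElem row 0 h1 h2]
        have hidx : ((i:Int) - (c:Int)).toNat = i - c := by omega
        rw [List.getElem_append_right (by simp; omega)]
        simp only [List.length_drop]
        rw [List.getElem_take]
        congr 1
        omega
      · have hic : i < c := by omega
        have hcast : (i:Int) - (c:Int) = -((c - i : Nat) : Int) := by omega
        rw [Function.comp_apply, hcast,
          PySem.List.pyGetD_neg_natCast row (c - i) 0 (by omega) (by omega)]
        rw [List.getElem_append_left (by simp; omega)]
        rw [List.getElem_drop]
        congr 1
        omega

-- A's odd-row inner loop ((j+k)%n indexing, a left rotation) equals B's slice concatenation.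
theorem row_odd (row : List Int) (c : Nat) (hc : c < row.length) :
    (PySem.List.pyRange 0 (row.length : Int) 1).map
        (fun j => PySem.List.pyGetD row (PySem.Int.mod (j + (c : Int)) (row.length : Int)) 0)
      = PySem.List.slice row (some ((c : Int))) none ++
        PySem.List.slice row none (some ((c : Int))) := by
  rw [PySem.List.slice_from row (by positivity), PySem.List.slice_to row (by positivity),
    PySem.List.pyRange_zero_natCast, List.map_map]
  simp only [Int.toNat_natCast]
  apply List.ext_getElem
  · simp; omega
  · intro i hi hi'
    simp only [List.length_map, List.length_range] at hi
    rw [List.getElem_map, List.getElem_range, Function.comp_apply]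
    have hcast : (i:Int) + (c:Int) = ((i + c : Nat) : Int) := by push_cast; ring
    rw [hcast, PySem.Int.mod_natCast]
    have hmodlt : (i + c) % row.length < row.length := Nat.mod_lt _ (by omega)
    rw [PySem.List.pyGetD_eq_getElem row 0 (by positivity) (by exact_mod_cast hmodlt)]
    simp only [Int.toNat_natCast]
    by_cases hi2 : i < row.length - c
    · rw [List.getElem_append_left (by simp; omega), List.getElem_drop]
      congr 1
      rw [Nat.mod_eq_of_lt (by omega)]
      omega
    · rw [List.getElem_append_right (by simp; omega)]
      simp only [List.length_drop]
      rw [List.getElem_take]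
      congr 1
      rw [Nat.mod_eq_sub_mod (by omega), Nat.mod_eq_of_lt (by omega)]
      omega

-- ===== VERDICT (by name: the statement is the Claim_ definition above) =====
theorem areSimilar_spec : Claim_equal_areSimilar := by
  unfold Claim_equal_areSimilar
  intro mat k _ hpre
  obtain ⟨hne, hn0, hrect⟩ := hpre
  unfold Spec_areSimilar
  cases mat with
  | nil => exact absurd rfl hne
  | cons r0 rest =>
  simp only [List.headI] at hn0 hrect
  have hnz : (r0.length : Int) ≠ 0 := by
    have : (0:Int) < (r0.length : Int) := by exact_mod_cast hn0
    omega
  have hget : PySem.List.pyGet? (r0 :: rest) 0 = some r0 := PySem.List.pyGet?_zero_cons r0 rest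
  have hmod : PySem.Int.mod? k (r0.length : Int) = some (PySem.Int.mod k (r0.length : Int)) := by
    simp [PySem.Int.mod?, PySem.Int.mod]
    intro h
    rw [h] at hn0
    simp at hn0
  have hk0 : 0 ≤ PySem.Int.mod k (r0.length : Int) := PySem.Int.mod_nonneg k (by omega)
  have hk1 : PySem.Int.mod k (r0.length : Int) < (r0.length : Int) := PySem.Int.mod_lt k (by omega)
  have hkc : PySem.Int.mod k (r0.length : Int) = ((PySem.Int.mod k (r0.length : Int)).toNat : Int) := by omega
  have hcn : (PySem.Int.mod k (r0.length : Int)).toNat < r0.length := by omega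
  unfold areSimilar areSimilar_alt
  simp only [hget, hmod]
  set kk := PySem.Int.mod k (r0.length : Int) with hkkdef
  set c := kk.toNat with hcdef
  have hlen : ∀ i (h : i < (r0 :: rest).length), (r0 :: rest)[i].length = r0.length := by
    intro i h; exact hrect _ (List.getElem_mem h)
  rw [Bool.eq_iff_iff, beq_iff_eq, List.all_eq_true]
  have key : List.map
        (fun i =>
          List.map
            (fun j =>
              if (PySem.Int.mod i 2 == 0) = true then PySem.List.pyGetD (PySem.List.pyGetD (r0 :: rest) i []) (j - kk) 0
              else PySem.List.pyGetD (PySem.List.pyGetD (r0 :: rest) i []) (PySem.Int.mod (j + kk) (r0.length : Int)) 0)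
            (PySem.List.pyRange 0 (r0.length : Int)))
        (PySem.List.pyRange 0 (((r0 :: rest).length : Nat) : Int))
      = (PySem.List.enumerate (r0 :: rest)).map (fun p =>
          if (PySem.Int.mod p.1 2 == 0) = true then
            PySem.List.slice p.2 (some (-kk)) ++ PySem.List.slice p.2 none (some (-kk))
          else PySem.List.slice p.2 (some kk) ++ PySem.List.slice p.2 none (some kk)) := by
    apply List.ext_getElem?
    intro i
    by_cases hienum : i < (r0 :: rest).length
    · rw [PySem.List.getElem?_map_pyRange_zero _ _ i hienum,
        List.getElem?_map, PySem.List.getElem?_enumerate, List.getElem?_eq_getElem hienum]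
      simp only [Option.map_some, Option.some_inj, zero_add]
      have hgd : PySem.List.pyGetD (r0 :: rest) (i : Int) [] = (r0 :: rest)[i] := by
        rw [PySem.List.pyGetD_eq_getElem (r0 :: rest) [] (by positivity) (by exact_mod_cast hienum)]
        simp
      rw [hgd]
      have hrl : (r0 :: rest)[i].length = r0.length := hlen i hienum
      by_cases hpar : (PySem.Int.mod (i : Int) 2 == 0) = true
      · simp only [hpar, if_true, hkc]
        have := row_even (r0 :: rest)[i] c (by rw [hrl]; exact hcn)
        rw [hrl] at this
        exact this
      · simp only [hpar, hkc]
        have := row_odd (r0 :: rest)[i] c (by rw [hrl]; exact hcn)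
        rw [hrl] at this
        exact this
    · rw [List.getElem?_eq_none (by simpa [PySem.List.pyRange_zero_natCast] using hienum),
        List.getElem?_eq_none (by simpa [PySem.List.length_enumerate] using hienum)]
  rw [key]
  constructor
  · intro heq p hp
    obtain ⟨i, h, rfl⟩ := (PySem.List.mem_enumerate_iff _ _ _).mp hp
    have h2 : i < ((PySem.List.enumerate (r0 :: rest)).map (fun p =>
          if (PySem.Int.mod p.1 2 == 0) = true then
            PySem.List.slice p.2 (some (-kk)) ++ PySem.List.slice p.2 none (some (-kk))
          else PySem.List.slice p.2 (some kk) ++ PySem.List.slice p.2 none (some kk))).length := by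
      simpa [PySem.List.length_enumerate] using h
    have h3 := List.getElem_of_eq heq h2
    rw [List.getElem_map, PySem.List.getElem_enumerate] at h3
    rw [beq_iff_eq]
    simpa using h3
  · intro hall
    apply List.ext_getElem
    · simp [PySem.List.length_enumerate]
    · intro i h1 h2
      rw [List.getElem_map, PySem.List.getElem_enumerate]
      have hienum : i < (r0 :: rest).length := by
        simpa [PySem.List.length_enumerate] using h1
      have hp : ((0 : Int) + (i : Nat), (r0 :: rest)[i]) ∈ PySem.List.enumerate (r0 :: rest) 0 := by
        rw [PySem.List.mem_enumerate_iff]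
        exact ⟨i, hienum, rfl⟩
      have h4 := hall _ hp
      rw [beq_iff_eq] at h4
      simpa using h4
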